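-- pv_equiv track=rewrite | github.com/BYU-CSA/old-ctf-challenges | cryptography/b-z then 10/base23-22.py | base_23_to_base_22
-- ===== SOURCE A (Python) =====
-- def base_23_to_base_22(number):
--     decimal = 0
--     power = 0
--     for digit in number[::-1]:
--         if digit.isdigit():
--             decimal += int(digit) * (23 ** power)
--         else:
--             decimal += (ord(digit) - 55) * (23 ** power)
--         power += 1
--     result = ''
--     while decimal > 0:
--         remainder = decimal % 22
--         if remainder < 10:
--             result = str(remainder) + result
--         else:
--             result = chr(55 + remainder) + result
--         decimal = decimal // 22
--     return result
-- ===== SOURCE B (Python) =====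
-- def base_23_to_base_22(number):
--     decimal = 0
--     for digit in number:
--         if digit.isdigit():
--             decimal = decimal * 23 + int(digit)
--         else:
--             decimal = decimal * 23 + (ord(digit) - 55)
--     digits = []
--     while decimal > 0:
--         decimal, remainder = divmod(decimal, 22)
--         digits.append(str(remainder) if remainder < 10 else chr(55 + remainder))
--     return ''.join(reversed(digits))
-- ===== Notes on version B (the rewrite author's own statement) =====
-- stated objective: faster
-- what changed: The reversed-iteration parse that recomputes 23**power for every character is replaced by a single forward Horner pass (decimal = decimal*23 + d), and the base-22 output is collected into a digit list joined once in reverse instead of repeated string prepending.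
import Mathlib
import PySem

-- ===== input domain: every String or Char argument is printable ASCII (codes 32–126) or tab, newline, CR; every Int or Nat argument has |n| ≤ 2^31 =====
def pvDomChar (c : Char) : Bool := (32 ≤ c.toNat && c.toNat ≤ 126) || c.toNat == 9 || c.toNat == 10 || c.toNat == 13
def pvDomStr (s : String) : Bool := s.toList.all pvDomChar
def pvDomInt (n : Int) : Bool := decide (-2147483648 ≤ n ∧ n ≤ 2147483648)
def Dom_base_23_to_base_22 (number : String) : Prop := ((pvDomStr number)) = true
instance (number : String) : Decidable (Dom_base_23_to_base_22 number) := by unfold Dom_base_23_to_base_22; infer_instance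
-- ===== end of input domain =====

-- B replaces A's reversed iteration with explicit 23**power bookkeeping by a single forward
-- Horner pass, and emits base-22 digits into a list joined once instead of prepending to a
-- string (objective: simpler).

-- shared by both Python sources verbatim: the per-character decode
-- (int(digit) never raises here: the branch is guarded by isdigit, so the .getD 0 default is unreachable)
def pvDecode (c : Char) : Int :=
  if PySem.Chars.isdigit c then (PySem.Int.ofChars? [c]).getD 0 else (c.toNat : Int) - 55

-- shared by both Python sources verbatim: the base-22 digit rendered as characters
-- (str(r) for r < 10, chr(55 + r) otherwise; 10 ≤ r < 22 there, so Char.ofNat is exact)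
def pvChunk (r : Int) : List Char :=
  if r < 10 then PySem.Int.toChars r else [Char.ofNat (55 + r).toNat]

-- ===== PORT A =====
-- for digit in number[::-1]: decimal += decode(digit) * 23 ** power; power += 1
def pvA_parse : List Char → Int → Nat → Int
  | [], decimal, _ => decimal
  | c :: rest, decimal, power => pvA_parse rest (decimal + pvDecode c * 23 ^ power) (power + 1)

-- while decimal > 0: result = chunk(decimal % 22) + result; decimal = decimal // 22
def pvA_out (decimal : Int) (result : List Char) : List Char :=
  if _h : 0 < decimal then
    pvA_out (PySem.Int.floordiv decimal 22) (pvChunk (PySem.Int.mod decimal 22) ++ result)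
  else result
termination_by decimal.toNat
decreasing_by rw [PySem.Int.floordiv_eq_ediv_of_pos (by omega)]; omega

def base_23_to_base_22 (number : String) : String :=
  let rev := (PySem.Str.slice? number none none (-1)).getD ""   -- step -1 ≠ 0: never none
  String.ofList (pvA_out (pvA_parse rev.toList 0 0) [])

-- ===== PORT B =====
-- for digit in number: decimal = decimal * 23 + decode(digit)
def pvB_parse (number : String) : Int :=
  number.toList.foldl (fun decimal c => decimal * 23 + pvDecode c) 0

-- while decimal > 0: decimal, remainder = divmod(decimal, 22); digits.append(chunk(remainder))
def pvB_digits (decimal : Int) (digits : List (List Char)) : List (List Char) :=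
  if _h : 0 < decimal then
    let qr := (PySem.Int.divmod? decimal 22).getD (0, 0)   -- 22 ≠ 0: never none
    pvB_digits qr.1 (digits ++ [pvChunk qr.2])
  else digits
termination_by decimal.toNat
decreasing_by
  simp only [PySem.Int.divmod?, if_neg (by norm_num : ¬ (22:Int) = 0), Option.getD_some]
  have h22 : PySem.Int.floordiv decimal 22 = decimal / 22 :=
    PySem.Int.floordiv_eq_ediv_of_pos (by norm_num)
  simp only [PySem.Int.floordiv] at h22
  omega

-- return ''.join(reversed(digits))
def base_23_to_base_22_alt (number : String) : String :=
  String.ofList ((pvB_digits (pvB_parse number) []).reverse.flatten)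

-- ===== PRECONDITION & SPEC =====
def Spec_base_23_to_base_22 (number : String) (out : String) : Prop := out = base_23_to_base_22_alt number
instance (number : String) (out : String) : Decidable (Spec_base_23_to_base_22 number out) := by unfold Spec_base_23_to_base_22; infer_instance

-- ===== CLAIM (what is proved, stated in full; the proofs are below) =====
def Claim_equal_base_23_to_base_22 : Prop := ∀ (number : String), Dom_base_23_to_base_22 number → Spec_base_23_to_base_22 number (base_23_to_base_22 number)

-- ===== LEMMAS AND PROOFS =====

-- little-endian value of a digit list: pvPoly [d0, d1, …] = Σ decode di * 23^i
def pvPoly : List Char → Int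
  | [] => 0
  | c :: t => pvDecode c + 23 * pvPoly t

theorem pvA_parse_eq (l : List Char) : ∀ (d : Int) (p : Nat),
    pvA_parse l d p = d + 23 ^ p * pvPoly l := by
  induction l with
  | nil => intro d p; simp [pvA_parse, pvPoly]
  | cons c t ih =>
      intro d p
      rw [pvA_parse, ih, pvPoly]
      ring

theorem pvPoly_append_singleton (xs : List Char) (c : Char) :
    pvPoly (xs ++ [c]) = pvPoly xs + pvDecode c * 23 ^ xs.length := by
  induction xs with
  | nil => simp [pvPoly]
  | cons x t ih => simp [pvPoly, ih]; ring

theorem pvB_horner (l : List Char) : ∀ (a : Int),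
    l.foldl (fun decimal c => decimal * 23 + pvDecode c) a
      = a * 23 ^ l.length + pvPoly l.reverse := by
  induction l with
  | nil => intro a; simp [pvPoly]
  | cons c t ih =>
      intro a
      rw [List.foldl_cons, ih, List.reverse_cons, pvPoly_append_singleton,
        List.length_cons, List.length_reverse]
      ring

theorem pvB_divmod_getD (d : Int) :
    (PySem.Int.divmod? d 22).getD (0, 0) = (PySem.Int.floordiv d 22, PySem.Int.mod d 22) := by
  simp [PySem.Int.divmod?, PySem.Int.floordiv, PySem.Int.mod]

theorem pvB_digits_eq (d : Int) (acc : List (List Char)) :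
    pvB_digits d acc
      = if 0 < d then
          pvB_digits (PySem.Int.floordiv d 22) (acc ++ [pvChunk (PySem.Int.mod d 22)])
        else acc := by
  rw [pvB_digits]
  simp [pvB_divmod_getD]

theorem pvFdiv_toNat_lt (d : Int) (h : 0 < d) :
    (PySem.Int.floordiv d 22).toNat < d.toNat := by
  rw [PySem.Int.floordiv_eq_ediv_of_pos (by omega)]; omega

theorem pvB_digits_acc : ∀ (n : Nat) (d : Int), d.toNat ≤ n →
    ∀ (acc : List (List Char)), pvB_digits d acc = acc ++ pvB_digits d [] := by
  intro n
  induction n with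
  | zero =>
      intro d hd acc
      have hneg : ¬ 0 < d := by omega
      rw [pvB_digits_eq d acc, if_neg hneg, pvB_digits_eq d [], if_neg hneg]
      simp
  | succ n ih =>
      intro d hd acc
      rw [pvB_digits_eq d acc, pvB_digits_eq d []]
      by_cases h : 0 < d
      · rw [if_pos h, if_pos h]
        have hq := pvFdiv_toNat_lt d h
        rw [ih _ (by omega) (acc ++ [pvChunk (PySem.Int.mod d 22)]),
          ih _ (by omega) ([] ++ [pvChunk (PySem.Int.mod d 22)])]
        simp
      · rw [if_neg h, if_neg h]; simp

theorem pvA_out_eq_digits : ∀ (n : Nat) (d : Int), d.toNat ≤ n →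
    ∀ (res : List Char),
      pvA_out d res = (pvB_digits d []).reverse.flatten ++ res := by
  intro n
  induction n with
  | zero =>
      intro d hd res
      rw [pvA_out, pvB_digits_eq]
      rw [dif_neg (by omega), if_neg (by omega)]
      simp
  | succ n ih =>
      intro d hd res
      rw [pvA_out, pvB_digits_eq]
      by_cases h : 0 < d
      · rw [dif_pos h, if_pos h]
        have hq := pvFdiv_toNat_lt d h
        rw [ih _ (by omega)]
        simp only [List.nil_append]
        rw [pvB_digits_acc (PySem.Int.floordiv d 22).toNat (PySem.Int.floordiv d 22)
            (le_refl _) [pvChunk (PySem.Int.mod d 22)]]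
        simp
      · rw [dif_neg h, if_neg h]; simp

-- ===== VERDICT (by name: the statement is the Claim_ definition above) =====
theorem base_23_to_base_22_spec : Claim_equal_base_23_to_base_22 := by
  unfold Claim_equal_base_23_to_base_22
  intro number _
  unfold Spec_base_23_to_base_22 base_23_to_base_22 base_23_to_base_22_alt
  rw [PySem.Str.slice?_none_none_neg_one]
  simp only [Option.getD_some]
  have hparse : pvA_parse (String.ofList number.toList.reverse).toList 0 0 = pvB_parse number := by
    rw [pvB_parse, pvB_horner number.toList 0, pvA_parse_eq]
    simp
  rw [hparse, pvA_out_eq_digits (pvB_parse number).toNat _ (le_refl _)]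
  simp
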